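-- pv_equiv track=rewrite | github.com/TommyFurgi/introduction-to-computer-science | zestaw 6/6.28.py | ile_jedynek
-- ===== SOURCE A (Python) =====
-- def ile_jedynek(tab):
--     licznik=0
--     for i in tab:
--         while i>0:
--             if i%2==1:
--                 licznik+=1
--             i//=2
--     return licznik
-- ===== SOURCE B (Python) =====
-- def ile_jedynek(tab):
--     return sum(i.bit_count() for i in tab if i > 0)
-- ===== Notes on version B (the rewrite author's own statement) =====
-- stated objective: idiomatic
-- what changed: A's nested loops (per-bit mod/floordiv scan inside a running counter) are replaced by a single expression summing the standard-library popcount int.bit_count() over the positive elements.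
import Mathlib
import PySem

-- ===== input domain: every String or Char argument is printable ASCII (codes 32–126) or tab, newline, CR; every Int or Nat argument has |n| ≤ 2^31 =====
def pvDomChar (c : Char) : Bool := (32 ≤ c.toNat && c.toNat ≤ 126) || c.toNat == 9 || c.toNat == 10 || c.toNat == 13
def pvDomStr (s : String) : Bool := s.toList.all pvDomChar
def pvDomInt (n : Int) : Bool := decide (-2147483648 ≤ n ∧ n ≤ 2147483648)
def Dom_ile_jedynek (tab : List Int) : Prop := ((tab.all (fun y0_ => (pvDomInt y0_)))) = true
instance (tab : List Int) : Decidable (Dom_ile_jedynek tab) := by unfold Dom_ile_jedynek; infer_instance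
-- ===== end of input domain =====

-- ===== PORT A =====
-- B replaces A's nested per-bit scan by summing the standard-library popcount over the positive elements (idiomatic).

-- inner 'while i>0: if i%2==1: licznik+=1; i//=2'
def pvLoopA (i : Int) (licznik : Int) : Int :=
  if 0 < i then
    pvLoopA (PySem.Int.floordiv i 2)
      (if PySem.Int.mod i 2 = 1 then licznik + 1 else licznik)
  else licznik
termination_by i.toNat
decreasing_by
  rw [PySem.Int.floordiv_eq_ediv_of_pos (by omega : (0:Int) < 2)]
  omega

def ile_jedynek (tab : List Int) : Int :=
  tab.foldl (fun licznik i => pvLoopA i licznik) 0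

-- ===== PORT B =====
-- 'sum(i.bit_count() for i in tab if i > 0)'; bit_count ported as PySem.Int.bitCount
def ile_jedynek_alt (tab : List Int) : Int :=
  ((tab.filter (fun i => decide (0 < i))).map
      (fun i => ((PySem.Int.bitCount i : Nat) : Int))).sum

-- ===== PRECONDITION & SPEC =====
def Spec_ile_jedynek (tab : List Int) (out : Int) : Prop := out = ile_jedynek_alt tab
instance (tab : List Int) (out : Int) : Decidable (Spec_ile_jedynek tab out) := by unfold Spec_ile_jedynek; infer_instance

-- ===== CLAIM (what is proved, stated in full; the proofs are below) =====
def Claim_equal_ile_jedynek : Prop := ∀ (tab : List Int), Dom_ile_jedynek tab → Spec_ile_jedynek tab (ile_jedynek tab)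

-- ===== LEMMAS AND PROOFS =====

-- ===== VERDICT (by name: the statement is the Claim_ definition above) =====
-- A's inner loop computes the running count plus the bit count of i (when i > 0)
theorem pv_loopA_eq (i c : Int) :
    pvLoopA i c = c + (if 0 < i then ((PySem.Int.bitCount i : Nat) : Int) else 0) := by
  induction i, c using pvLoopA.induct with
  | case1 i c h ih =>
    rw [pvLoopA, if_pos h]
    rw [dite_eq_ite] at ih
    rw [ih, if_pos h]
    have hfd : PySem.Int.floordiv i 2 = i / 2 :=
      PySem.Int.floordiv_eq_ediv_of_pos (by omega)
    have hmod : PySem.Int.mod i 2 = i % 2 :=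
      PySem.Int.mod_eq_emod_of_pos (by omega)
    have hbc := PySem.Int.bitCount_of_pos (n := i) h
    have hfz : PySem.Int.floordiv i 2 ≤ 0 → PySem.Int.floordiv i 2 = 0 := by
      rw [hfd]; omega
    rcases lt_or_ge 0 (PySem.Int.floordiv i 2) with hp | hp
    · rw [if_pos hp, hbc]
      rcases Int.emod_two_eq_zero_or_one i with hm | hm
      · rw [if_neg (by rw [hmod, hm]; omega), hmod, hm]
        simp
      · rw [if_pos (by rw [hmod, hm]), hmod, hm]
        simp
        omega
    · have hz : PySem.Int.floordiv i 2 = 0 := hfz (by omega)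
      rw [if_neg hp.not_gt, hbc, hz]
      have hm : i % 2 = 1 := by rw [hfd] at hz; omega
      rw [if_pos (by rw [hmod, hm]), hmod, hm]
      simp
  | case2 i c h =>
    rw [pvLoopA, if_neg h, if_neg h]
    omega

-- A's fold, started at c, adds the popcount-sum of the positive elements
theorem pv_foldA_eq (tab : List Int) (c : Int) :
    tab.foldl (fun licznik i => pvLoopA i licznik) c
      = c + ((tab.filter (fun i => decide (0 < i))).map
              (fun i => ((PySem.Int.bitCount i : Nat) : Int))).sum := by
  induction tab generalizing c with
  | nil => simp
  | cons x xs ih =>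
    simp only [List.foldl_cons, List.filter_cons]
    rw [ih, pv_loopA_eq]
    by_cases h : 0 < x
    · rw [if_pos h]
      simp [h]
      ring
    · rw [if_neg h]
      simp [h]

-- ===== VERDICT (by name: the statement is the Claim_ definition above) =====
theorem ile_jedynek_spec : Claim_equal_ile_jedynek := by
  intro tab _
  unfold Spec_ile_jedynek ile_jedynek ile_jedynek_alt
  rw [pv_foldA_eq]
  omega
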